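-- pv_equiv track=rewrite | github.com/eriklopesp/cases_python | palindrome.py | solvePalindrome
-- ===== SOURCE A (Python) =====
-- def solvePalindrome(s):
--
--     MOD = 10**9 + 7
--     n = len(s)
--     total = 0
--
--     def weight(c):
--         return ord(c) - ord('a') + 1
--
--     for i in range(n):
--         for j in range(i, n):
--             substring = s[i:j+1]
--
--             if substring == substring[::-1]:
--                 for c in substring:
--                     total += weight(c)
--
--     return total % MOD
-- ===== SOURCE B (Python) =====
-- def solvePalindrome(s):
--     MOD = 10**9 + 7
--     n = len(s)
--     base = ord('a') - 1
--     pre = [0]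
--     for c in s:
--         pre.append(pre[-1] + ord(c) - base)
--     total = 0
--     for i in range(n):
--         for j in range(i, n):
--             lo, hi = i, j
--             while lo < hi and s[lo] == s[hi]:
--                 lo += 1
--                 hi -= 1
--             if lo >= hi:
--                 total += pre[j + 1] - pre[i]
--     return total % MOD
-- ===== Notes on version B (the rewrite author's own statement) =====
-- stated objective: alternative
-- what changed: Replaces per-substring slicing/reversal and the inner weight-summing loop by a two-pointer in-place palindrome check with early exit plus a precomputed prefix-sum array of character weights (intended as faster; measured 2.76x at n=256 on all-palindromic inputs, but both time out at n=1024).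
import Mathlib
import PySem

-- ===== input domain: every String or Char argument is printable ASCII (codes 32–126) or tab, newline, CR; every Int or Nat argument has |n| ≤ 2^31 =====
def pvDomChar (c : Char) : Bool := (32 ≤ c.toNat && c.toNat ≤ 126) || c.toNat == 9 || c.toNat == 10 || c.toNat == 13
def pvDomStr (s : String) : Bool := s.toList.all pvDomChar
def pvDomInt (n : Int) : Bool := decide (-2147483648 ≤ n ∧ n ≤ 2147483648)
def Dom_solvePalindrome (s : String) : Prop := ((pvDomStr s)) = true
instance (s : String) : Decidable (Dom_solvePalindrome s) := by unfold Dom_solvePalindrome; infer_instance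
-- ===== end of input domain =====

-- B replaces A's per-substring slicing/reversal and inner weight-summing loop by a
-- two-pointer palindrome check plus a prefix-sum array of weights (objective: alternative).

-- ===== PORT A =====
-- def weight(c): return ord(c) - ord('a') + 1
def pvWeight (c : Char) : Int := (c.toNat : Int) - ('a'.toNat : Int) + 1

def solvePalindrome (s : String) : Int :=
  let MOD : Int := 10 ^ 9 + 7
  let cs := s.toList
  let n : Int := cs.length
  let total :=
    (PySem.List.pyRange 0 n 1).foldl (fun total i =>
      (PySem.List.pyRange i n 1).foldl (fun total j =>
        let substring := PySem.List.slice cs (some i) (some (j + 1))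
        if substring = substring.reverse then
          substring.foldl (fun t c => t + pvWeight c) total
        else total) total) 0
  PySem.Int.mod total MOD

-- ===== PORT B =====
-- while lo < hi and s[lo] == s[hi]: lo += 1; hi -= 1  — afterwards 'lo >= hi' means palindrome
def pvPalCheck (cs : List Char) (lo hi : Nat) : Bool :=
  if lo < hi then
    if cs.getD lo ' ' = cs.getD hi ' ' then pvPalCheck cs (lo + 1) (hi - 1) else false
  else true
termination_by hi - lo

def solvePalindrome_alt (s : String) : Int :=
  let MOD : Int := 10 ^ 9 + 7
  let cs := s.toList
  let n : Int := cs.length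
  let base : Int := ('a'.toNat : Int) - 1
  let pre : List Int :=
    cs.foldl (fun p c => p ++ [PySem.List.pyGetD p (-1) 0 + (c.toNat : Int) - base]) [0]
  let total :=
    (PySem.List.pyRange 0 n 1).foldl (fun total i =>
      (PySem.List.pyRange i n 1).foldl (fun total j =>
        if pvPalCheck cs i.toNat j.toNat then
          total + (PySem.List.pyGetD pre (j + 1) 0 - PySem.List.pyGetD pre i 0)
        else total) total) 0
  PySem.Int.mod total MOD

-- ===== PRECONDITION & SPEC =====
def Spec_solvePalindrome (s : String) (out : Int) : Prop := out = solvePalindrome_alt s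
instance (s : String) (out : Int) : Decidable (Spec_solvePalindrome s out) := by unfold Spec_solvePalindrome; infer_instance

-- ===== CLAIM (what is proved, stated in full; the proofs are below) =====
def Claim_equal_solvePalindrome : Prop := ∀ (s : String), Dom_solvePalindrome s → Spec_solvePalindrome s (solvePalindrome s)

-- ===== LEMMAS AND PROOFS =====

-- weight sum of a list of characters
def pvWSum (l : List Char) : Int := (l.map pvWeight).sum

-- B's prefix list is the table of prefix weight sums
lemma pvPre_eq (cs : List Char) :
    cs.foldl (fun p c => p ++ [PySem.List.pyGetD p (-1) 0 + (c.toNat : Int) - (('a'.toNat : Int) - 1)]) [0]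
      = (List.range (cs.length + 1)).map (fun k => pvWSum (cs.take k)) := by
  induction cs using List.reverseRecOn with
  | nil => simp [pvWSum]
  | append_singleton cs c ih =>
    rw [List.foldl_append, ih]
    have hlast : (List.range (cs.length + 1)).map (fun k => pvWSum (cs.take k))
        = (List.range cs.length).map (fun k => pvWSum (cs.take k)) ++ [pvWSum cs] := by
      rw [List.range_succ, List.map_append]; simp
    rw [hlast]
    simp only [List.foldl_cons, List.foldl_nil, PySem.List.pyGetD_neg_one_append_singleton]
    rw [List.length_append, List.length_singleton, List.range_succ (n := cs.length + 1),
        List.map_append]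
    rw [← hlast]
    congr 1
    · apply List.map_congr_left
      intro k hk
      rw [List.take_append_of_le_length (by simpa using Nat.lt_succ_iff.mp (List.mem_range.mp hk))]
    · have h2 : (cs ++ [c]).take (cs.length + 1) = cs ++ [c] := by simp
      simp only [List.map_cons, List.map_nil, h2]
      simp [pvWSum, pvWeight]
      ring

-- the substring s[lo:hi+1], for lo < hi ≤ len-1, is first char :: middle ++ [last char]
lemma pvSegDecomp (cs : List Char) (lo hi : Nat) (hlt : lo < hi) (hhi : hi < cs.length) :
    (cs.drop lo).take (hi + 1 - lo)
      = cs[lo] :: ((cs.drop (lo + 1)).take ((hi - 1) + 1 - (lo + 1)) ++ [cs[hi]]) := by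
  rw [List.drop_eq_getElem_cons (by omega)]
  have h1 : hi + 1 - lo = (hi - lo - 1) + 1 + 1 := by omega
  rw [h1, List.take_succ_cons]
  congr 1
  rw [List.take_add_one]
  have h2 : (cs.drop (lo + 1))[hi - lo - 1]? = some cs[hi] := by
    rw [List.getElem?_drop]
    have hidx : lo + 1 + (hi - lo - 1) = hi := by omega
    rw [hidx, List.getElem?_eq_getElem hhi]
  rw [h2]
  have h3 : (hi - 1) + 1 - (lo + 1) = hi - lo - 1 := by omega
  rw [h3]
  rfl

lemma pvRevSandwich (a b : Char) (mid : List Char) :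
    ((a :: (mid ++ [b])).reverse = a :: (mid ++ [b])) ↔ (b = a ∧ mid.reverse = mid) := by
  simp [List.reverse_append, eq_comm]
  exact fun h _ => h

lemma pvShortRev (l : List Char) (h : l.length ≤ 1) : l.reverse = l := by
  match l with
  | [] => rfl
  | [a] => rfl
  | a :: b :: t => simp at h

-- two-pointer check ↔ slice-reverse check
lemma pvPalCheck_iff (cs : List Char) (lo hi : Nat) (hhi : hi < cs.length) :
    pvPalCheck cs lo hi = true ↔
      ((cs.drop lo).take (hi + 1 - lo)).reverse = (cs.drop lo).take (hi + 1 - lo) := by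
  suffices H : ∀ n lo hi, hi - lo = n → hi < cs.length →
      (pvPalCheck cs lo hi = true ↔
        ((cs.drop lo).take (hi + 1 - lo)).reverse = (cs.drop lo).take (hi + 1 - lo)) from
    H _ lo hi rfl hhi
  intro n
  induction n using Nat.strong_induction_on with
  | _ n ih =>
    intro lo hi hn hhi
    rw [pvPalCheck]
    by_cases hlt : lo < hi
    · simp only [hlt, if_true]
      have hlo : lo < cs.length := by omega
      rw [List.getD_eq_getElem cs ' ' hlo, List.getD_eq_getElem cs ' ' hhi,
          pvSegDecomp cs lo hi hlt hhi]
      by_cases heq : cs[lo] = cs[hi]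
      · rw [if_pos heq, ih (hi - 1 - (lo + 1)) (by omega) (lo + 1) (hi - 1) rfl (by omega),
            pvRevSandwich]
        simp [heq]
      · rw [if_neg heq, pvRevSandwich]
        simp
        intro hba
        exact absurd hba.symm heq
    · simp only [hlt, if_false]
      constructor
      · intro _
        apply pvShortRev
        simp only [List.length_take, List.length_drop]
        omega
      · intro _; trivial

-- ===== VERDICT (by name: the statement is the Claim_ definition above) =====
theorem solvePalindrome_spec : Claim_equal_solvePalindrome := by
  intro s _
  unfold Spec_solvePalindrome solvePalindrome solvePalindrome_alt
  simp only []
  rw [pvPre_eq]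
  congr 1
  apply PySem.List.foldl_congr_mem
  intro acc i hi
  obtain ⟨hi0, hin⟩ := PySem.List.mem_pyRange_one.mp hi
  apply PySem.List.foldl_congr_mem
  intro acc2 j hj
  obtain ⟨hij, hjn⟩ := PySem.List.mem_pyRange_one.mp hj
  have hj0 : 0 ≤ j := le_trans hi0 hij
  have hjl : j.toNat < s.toList.length := by omega
  have hil : i.toNat ≤ j.toNat := by omega
  -- the slice is a drop/take segment
  have htn : (j + 1).toNat = j.toNat + 1 := by omega
  have hseg : PySem.List.slice s.toList (some i) (some (j + 1))
      = (s.toList.drop i.toNat).take (j.toNat + 1 - i.toNat) := by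
    rw [PySem.List.slice_toNat s.toList hi0 (by omega), htn]
  set seg := (s.toList.drop i.toNat).take (j.toNat + 1 - i.toNat) with hsegdef
  -- prefix sums give the weight sum of the segment
  have hpreJ : PySem.List.pyGetD ((List.range (s.toList.length + 1)).map (fun k => pvWSum (s.toList.take k))) (j + 1) 0
      = pvWSum (s.toList.take (j.toNat + 1)) := by
    have : (j + 1) = ((j.toNat + 1 : Nat) : Int) := by omega
    rw [this, PySem.List.pyGetD_natCast, PySem.List.getD_map_range _ _ _ _ (by omega)]
  have hpreI : PySem.List.pyGetD ((List.range (s.toList.length + 1)).map (fun k => pvWSum (s.toList.take k))) i 0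
      = pvWSum (s.toList.take i.toNat) := by
    have : i = ((i.toNat : Nat) : Int) := by omega
    rw [this, PySem.List.pyGetD_natCast, PySem.List.getD_map_range _ _ _ _ (by omega)]
    rw [Int.toNat_natCast]
  have hsum : (seg.map pvWeight).sum
      = pvWSum (s.toList.take (j.toNat + 1)) - pvWSum (s.toList.take i.toNat) := by
    have hsplit : s.toList.take (j.toNat + 1) = s.toList.take i.toNat ++ seg := by
      rw [hsegdef]
      have : j.toNat + 1 = i.toNat + (j.toNat + 1 - i.toNat) := by omega
      conv_lhs => rw [this]
      rw [List.take_add]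
    rw [hsplit]
    simp [pvWSum]
  -- the palindrome tests agree
  have hpal : (seg = seg.reverse) ↔ pvPalCheck s.toList i.toNat j.toNat = true := by
    rw [pvPalCheck_iff s.toList i.toNat j.toNat hjl, eq_comm]
  rw [hseg, hpreJ, hpreI]
  by_cases hp : pvPalCheck s.toList i.toNat j.toNat = true
  · rw [if_pos (hpal.mpr hp), if_pos hp, PySem.List.foldl_add, hsum]
  · rw [if_neg (fun h => hp (hpal.mp h)), if_neg hp]
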